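-- pv_equiv track=rewrite | github.com/krdnzebrar/CMPE150-Projects | Image Processing/src/Main.py | misalign
-- ===== SOURCE A (Python) =====
-- def misalign(matrix):
--     height = len(matrix)
--     width = len(matrix[0])
--
--     new_matrix = [[0] * width for i in range(height)]
--     for c in range(width):
--         if c % 2 == 1:
--             a = 0
--             r = height - 1
--             while r >= 0:
--                 new_matrix[a][c] = matrix[r][c]
--                 r -= 1
--                 a += 1
--         else:
--             for r in range(height):
--                 new_matrix[r][c] = matrix[r][c]
--     return new_matrix
-- ===== SOURCE B (Python) =====
-- def misalign(matrix):
--     height = len(matrix)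
--     width = len(matrix[0])
--     # stage 1: transpose into a list of columns
--     cols = [[matrix[r][c] for r in range(height)] for c in range(width)]
--     # stage 2: vertically flip the odd columns
--     flipped = [col[::-1] if c % 2 else col for c, col in enumerate(cols)]
--     # stage 3: transpose back into rows
--     return [[flipped[c][r] for c in range(width)] for r in range(height)]
-- ===== Notes on version B (the rewrite author's own statement) =====
-- stated objective: alternative
-- what changed: replaced A's single column-major in-place fill of a preallocated matrix (two-pointer while-loop for odd columns) by a three-stage pipeline over a column-list data structure: transpose the matrix into columns, reverse the odd columns wholesale with col[::-1], and transpose back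
import Mathlib
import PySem

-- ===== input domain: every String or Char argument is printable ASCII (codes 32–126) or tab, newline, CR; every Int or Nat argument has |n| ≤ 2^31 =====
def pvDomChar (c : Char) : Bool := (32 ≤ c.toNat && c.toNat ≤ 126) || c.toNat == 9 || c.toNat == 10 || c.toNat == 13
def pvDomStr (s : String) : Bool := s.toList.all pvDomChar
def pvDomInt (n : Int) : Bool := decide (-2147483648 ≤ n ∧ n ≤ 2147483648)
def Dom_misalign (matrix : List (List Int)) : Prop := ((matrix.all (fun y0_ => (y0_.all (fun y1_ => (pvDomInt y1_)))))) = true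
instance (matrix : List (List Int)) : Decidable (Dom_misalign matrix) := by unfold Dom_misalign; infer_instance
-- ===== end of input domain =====

-- B replaces A's single column-major in-place fill of a preallocated matrix (with a
-- two-pointer while-loop for odd columns) by a three-stage pipeline over a column list:
-- transpose into columns, reverse the odd columns wholesale, transpose back.
-- Objective: alternative. Return-value equivalence only (A mutates no argument).

-- ===== PORT A =====
-- matrix[r][c] read; exact on Pre_ (index always in range there)
def pvRead (matrix : List (List Int)) (r c : Nat) : Int := (matrix.getD r []).getD c 0

-- new_matrix[r][c] = v
def pvWrite (m : List (List Int)) (r c : Nat) (v : Int) : List (List Int) :=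
  m.modify r (fun row => row.set c v)

-- the 'while r >= 0' loop of the odd branch; fuel = height bounds it exactly
def pvOddLoop (matrix : List (List Int)) (c : Nat) : Nat → Int → Nat → List (List Int) → List (List Int)
  | 0, _, _, nm => nm
  | fuel+1, r, a, nm =>
      if r ≥ 0 then
        pvOddLoop matrix c fuel (r - 1) (a + 1) (pvWrite nm a c (pvRead matrix r.toNat c))
      else nm

def misalign (matrix : List (List Int)) : List (List Int) :=
  let height := matrix.length
  let width := (matrix.getD 0 []).length
  let new0 := List.replicate height (List.replicate width (0 : Int))
  (List.range width).foldl (fun nm c =>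
    if c % 2 = 1 then
      pvOddLoop matrix c height ((height : Int) - 1) 0 nm
    else
      (List.range height).foldl (fun nm r => pvWrite nm r c (pvRead matrix r c)) nm) new0

-- ===== PORT B =====
-- stage 1: transpose into columns; stage 2: reverse odd columns (col[::-1] via
-- PySem slice?); stage 3: transpose back.  flipped[c][r] reads are in range on Pre_.
def misalign_alt (matrix : List (List Int)) : List (List Int) :=
  let height := matrix.length
  let width := (matrix.getD 0 []).length
  let cols := (List.range width).map (fun c => (List.range height).map (fun r => pvRead matrix r c))
  let flipped := (PySem.List.enumerate cols).map (fun p =>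
      if PySem.Int.mod p.1 2 ≠ 0 then (PySem.List.slice? p.2 none none (-1)).getD [] else p.2)
  (List.range height).map (fun r => (List.range width).map (fun c => (flipped.getD c []).getD r 0))

-- ===== PRECONDITION & SPEC =====
-- Pre_ excludes exactly the inputs where Python A raises IndexError: the empty matrix
-- (len(matrix[0])) and matrices with some row shorter than row 0 (matrix[r][c] read).
def Pre_misalign (matrix : List (List Int)) : Prop :=
  matrix ≠ [] ∧ ∀ row ∈ matrix, (matrix.getD 0 []).length ≤ row.length
instance (matrix : List (List Int)) : Decidable (Pre_misalign matrix) := by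
  unfold Pre_misalign; infer_instance

def pvWitness_misalign : List (List Int) := [[1, 2, 3], [4, 5, 6]]

def Spec_misalign (matrix : List (List Int)) (out : List (List Int)) : Prop := out = misalign_alt matrix
instance (matrix : List (List Int)) (out : List (List Int)) : Decidable (Spec_misalign matrix out) := by unfold Spec_misalign; infer_instance

-- ===== CLAIM (what is proved, stated in full; the proofs are below) =====
def Claim_equal_misalign : Prop := ∀ (matrix : List (List Int)), Dom_misalign matrix → Pre_misalign matrix → Spec_misalign matrix (misalign matrix)

-- ===== LEMMAS AND PROOFS =====

-- cell view of the intermediate matrix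
def pvCell? (m : List (List Int)) (r c : Nat) : Option Int := m[r]?.bind (fun row => row[c]?)

-- shape h × w
def pvShape (m : List (List Int)) (h w : Nat) : Prop :=
  m.length = h ∧ ∀ (i : Nat) (row : List Int), m[i]? = some row → row.length = w

lemma pvWrite_shape {m : List (List Int)} {h w : Nat} (hs : pvShape m h w) (r c : Nat) (v : Int) :
    pvShape (pvWrite m r c v) h w := by
  refine ⟨by simp [pvWrite, hs.1], ?_⟩
  intro i row hrow
  rw [pvWrite, List.getElem?_modify] at hrow
  cases hm : m[i]? with
  | none => rw [hm] at hrow; simp at hrow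
  | some row' =>
    rw [hm] at hrow
    simp at hrow
    have hlen := hs.2 i row' hm
    by_cases hri : r = i
    · rw [if_pos hri] at hrow; subst hrow; simp [hlen]
    · rw [if_neg hri] at hrow; subst hrow; exact hlen

lemma pvWrite_cell {m : List (List Int)} {h w : Nat} (hs : pvShape m h w)
    {r c : Nat} (hr : r < h) (hc : c < w) (v : Int) (r' c' : Nat) :
    pvCell? (pvWrite m r c v) r' c' =
      if r' = r ∧ c' = c then some v else pvCell? m r' c' := by
  unfold pvCell? pvWrite
  rw [List.getElem?_modify]
  by_cases hrr : r = r'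
  · subst hrr
    have hlt : r < m.length := hs.1 ▸ hr
    obtain ⟨row, hrow⟩ : ∃ row, m[r]? = some row := ⟨m[r], List.getElem?_eq_getElem hlt⟩
    have hwlen : row.length = w := hs.2 _ _ hrow
    rw [hrow]
    by_cases hcc : c = c'
    · subst hcc; simp [hwlen, hc]
    · simp [hcc]
      intro hh
      exact absurd hh.symm hcc
  · simp only [if_neg hrr]
    have : ¬ (r' = r ∧ c' = c) := fun hh => hrr hh.1.symm
    cases hm : m[r']? <;> simp [this]

lemma pvEven_loop (matrix : List (List Int)) (c h w : Nat) (hc : c < w) :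
    ∀ (k : Nat) (nm : List (List Int)), k ≤ h → pvShape nm h w →
      pvShape ((List.range k).foldl (fun nm r => pvWrite nm r c (pvRead matrix r c)) nm) h w ∧
      ∀ r' c', pvCell? ((List.range k).foldl (fun nm r => pvWrite nm r c (pvRead matrix r c)) nm) r' c' =
        if c' = c ∧ r' < k then some (pvRead matrix r' c) else pvCell? nm r' c' := by
  intro k
  induction k with
  | zero => intro nm _ hs; exact ⟨hs, fun r' c' => by simp⟩
  | succ k ih =>
    intro nm hk hs
    rw [List.range_succ, List.foldl_append]
    obtain ⟨ihs, ihcell⟩ := ih nm (by omega) hs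
    refine ⟨pvWrite_shape ihs _ _ _, ?_⟩
    intro r' c'
    simp only [List.foldl_cons, List.foldl_nil]
    rw [pvWrite_cell ihs (by omega) hc, ihcell]
    by_cases h1 : r' = k ∧ c' = c
    · obtain ⟨rfl, rfl⟩ := h1; simp
    · rw [if_neg h1]
      by_cases h2 : c' = c ∧ r' < k
      · rw [if_pos h2, if_pos ⟨h2.1, by omega⟩]
      · rw [if_neg h2, if_neg ?_]
        rintro ⟨hc', hr'⟩
        rcases Nat.lt_succ_iff_lt_or_eq.mp hr' with h3 | h3
        · exact h2 ⟨hc', h3⟩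
        · exact h1 ⟨h3, hc'⟩

lemma pvOdd_loop (matrix : List (List Int)) (c h w : Nat) (hc : c < w) :
    ∀ (fuel a : Nat) (nm : List (List Int)), a + fuel = h → pvShape nm h w →
      pvShape (pvOddLoop matrix c fuel ((h : Int) - 1 - a) a nm) h w ∧
      ∀ r' c', pvCell? (pvOddLoop matrix c fuel ((h : Int) - 1 - a) a nm) r' c' =
        if c' = c ∧ a ≤ r' ∧ r' < h then some (pvRead matrix (h - 1 - r') c)
        else pvCell? nm r' c' := by
  intro fuel
  induction fuel with
  | zero =>
    intro a nm ha hs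
    refine ⟨hs, ?_⟩
    intro r' c'
    rw [pvOddLoop, if_neg (by omega)]
  | succ fuel ih =>
    intro a nm ha hs
    have hguard : ((h : Int) - 1 - a) ≥ 0 := by omega
    have htn : ((h : Int) - 1 - a).toNat = h - 1 - a := by omega
    rw [pvOddLoop, if_pos hguard]
    have harg : ((h : Int) - 1 - a) - 1 = (h : Int) - 1 - ((a + 1 : Nat) : Int) := by push_cast; ring
    rw [harg, htn]
    obtain ⟨ihs, ihcell⟩ := ih (a + 1) _ (by omega) (pvWrite_shape hs a c _)
    refine ⟨ihs, ?_⟩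
    intro r' c'
    rw [ihcell, pvWrite_cell hs (by omega) hc]
    by_cases h2 : c' = c ∧ a + 1 ≤ r' ∧ r' < h
    · rw [if_pos h2, if_pos ⟨h2.1, by omega, h2.2.2⟩]
    · rw [if_neg h2]
      by_cases h1 : r' = a ∧ c' = c
      · obtain ⟨rfl, rfl⟩ := h1
        rw [if_pos ⟨rfl, rfl⟩, if_pos ⟨rfl, le_refl _, by omega⟩]
      · rw [if_neg h1, if_neg ?_]
        rintro ⟨hc', har, hrh⟩
        rcases Nat.eq_or_lt_of_le har with heq | hlt
        · exact h1 ⟨heq.symm, hc'⟩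
        · exact h2 ⟨hc', hlt, hrh⟩

lemma pvOuter_loop (matrix : List (List Int)) (h w : Nat)
    (F : List (List Int) → Nat → List (List Int))
    (hF : F = fun nm c =>
      if c % 2 = 1 then pvOddLoop matrix c h ((h : Int) - 1) 0 nm
      else (List.range h).foldl (fun nm r => pvWrite nm r c (pvRead matrix r c)) nm) :
    ∀ (k : Nat) (nm : List (List Int)), k ≤ w → pvShape nm h w →
      pvShape ((List.range k).foldl F nm) h w ∧
      ∀ r' c', c' < k → r' < h →
        pvCell? ((List.range k).foldl F nm) r' c' =
          some (if c' % 2 = 0 then pvRead matrix r' c' else pvRead matrix (h - 1 - r') c') := by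
  intro k
  induction k with
  | zero => intro nm _ hs; exact ⟨hs, by omega⟩
  | succ k ih =>
    intro nm hk hs
    rw [List.range_succ, List.foldl_append, List.foldl_cons, List.foldl_nil]
    obtain ⟨ihs, ihcell⟩ := ih nm (by omega) hs
    set M := (List.range k).foldl F nm with hM
    by_cases hpar : k % 2 = 1
    · have hstep := pvOdd_loop matrix k h w (by omega) h 0 M (by omega) ihs
      have hcast : ((h : Int) - 1 - (0 : Nat)) = (h : Int) - 1 := by simp
      rw [hF]
      simp only [if_pos hpar]
      rw [← hcast]
      refine ⟨hstep.1, ?_⟩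
      intro r' c' hc' hr'
      rw [hstep.2 r' c']
      by_cases hck : c' = k
      · subst hck
        rw [if_pos ⟨rfl, Nat.zero_le _, hr'⟩, if_neg (by omega)]
      · rw [if_neg (by rintro ⟨h1, _⟩; exact hck h1), ihcell r' c' (by omega) hr']
    · have hstep := pvEven_loop matrix k h w (by omega) h M (le_refl _) ihs
      rw [hF]
      simp only [if_neg hpar]
      refine ⟨hstep.1, ?_⟩
      intro r' c' hc' hr'
      rw [hstep.2 r' c']
      by_cases hck : c' = k
      · subst hck
        rw [if_pos ⟨rfl, hr'⟩, if_pos (by omega)]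
      · rw [if_neg (by rintro ⟨h1, _⟩; exact hck h1), ihcell r' c' (by omega) hr']

lemma pvShape_replicate (h w : Nat) :
    pvShape (List.replicate h (List.replicate w (0 : Int))) h w := by
  refine ⟨by simp, ?_⟩
  intro i row hrow
  rw [List.getElem?_replicate] at hrow
  by_cases hi : i < h
  · rw [if_pos hi] at hrow
    simp only [Option.some.injEq] at hrow
    subst hrow; simp
  · rw [if_neg hi] at hrow; simp at hrow

-- B computes the parity-selection formula cell by cell
lemma pvAlt_char (matrix : List (List Int)) :
    misalign_alt matrix =
      (List.range matrix.length).map (fun r =>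
        (List.range (matrix.getD 0 []).length).map (fun c =>
          if c % 2 = 0 then pvRead matrix r c
          else pvRead matrix (matrix.length - 1 - r) c)) := by
  unfold misalign_alt
  set h := matrix.length with hh
  set w := (matrix.getD 0 []).length with hw
  apply List.map_congr_left
  intro r hr
  rw [List.mem_range] at hr
  apply List.map_congr_left
  intro c hc
  rw [List.mem_range] at hc
  -- flipped[c]
  have hcols : ((List.range w).map (fun c => (List.range h).map (fun r => pvRead matrix r c)))[c]? =
      some ((List.range h).map (fun r => pvRead matrix r c)) := by
    rw [List.getElem?_map, List.getElem?_range hc, Option.map_some]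
  have henum := PySem.List.getElem?_enumerate
    (xs := (List.range w).map (fun c => (List.range h).map (fun r => pvRead matrix r c))) (s := 0) (k := c)
  rw [hcols] at henum
  have hflip : ((PySem.List.enumerate ((List.range w).map (fun c => (List.range h).map (fun r => pvRead matrix r c))) 0).map
      (fun p => if PySem.Int.mod p.1 2 ≠ 0 then (PySem.List.slice? p.2 none none (-1)).getD [] else p.2)).getD c [] =
      (if PySem.Int.mod ((0 : Int) + c) 2 ≠ 0
        then (PySem.List.slice? ((List.range h).map (fun r => pvRead matrix r c)) none none (-1)).getD []
        else (List.range h).map (fun r => pvRead matrix r c)) := by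
    rw [List.getD_eq_getElem?_getD, List.getElem?_map, henum]
    simp
  rw [hflip, PySem.List.slice?_none_none_neg_one]
  have hmod : PySem.Int.mod ((0 : Int) + c) 2 = ((c % 2 : Nat) : Int) := by
    simp [PySem.Int.mod, Int.fmod_eq_emod_of_nonneg _ (by norm_num : (0:Int) ≤ 2)]
  rw [hmod]
  by_cases hpar : c % 2 = 0
  · rw [if_neg (by simp [hpar]), if_pos hpar]
    rw [List.getD_eq_getElem?_getD, List.getElem?_map, List.getElem?_range hr]
    simp
  · rw [if_pos (by simp; omega), if_neg hpar]
    simp only [Option.getD_some]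
    have hlen : ((List.range h).map (fun r => pvRead matrix r c)).length = h := by simp
    have hrlt : r < ((List.range h).map (fun r => pvRead matrix r c)).reverse.length := by simp [hr]
    rw [List.getD_eq_getElem?_getD, List.getElem?_eq_getElem hrlt]
    rw [List.getElem_reverse]
    simp only [Option.getD_some]
    rw [List.getElem_map]
    congr 1
    rw [List.getElem_range]
    simp [hlen]

-- ===== VERDICT (by name: the statement is the Claim_ definition above) =====
theorem misalign_spec : Claim_equal_misalign := by
  intro matrix _ _
  unfold Spec_misalign
  rw [pvAlt_char]
  unfold misalign
  set h := matrix.length with hh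
  set w := (matrix.getD 0 []).length with hw
  obtain ⟨hshape, hcell⟩ :=
    pvOuter_loop matrix h w _ rfl w (List.replicate h (List.replicate w (0 : Int)))
      (le_refl _) (pvShape_replicate h w)
  set M := (List.range w).foldl _ (List.replicate h (List.replicate w (0 : Int))) with hMdef
  apply List.ext_getElem?
  intro r'
  by_cases hr' : r' < h
  · have hlt : r' < M.length := hshape.1 ▸ hr'
    obtain ⟨row, hrow⟩ : ∃ row, M[r']? = some row := ⟨M[r'], List.getElem?_eq_getElem hlt⟩
    have hrlen : row.length = w := hshape.2 _ _ hrow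
    rw [hrow, List.getElem?_map, List.getElem?_range hr', Option.map_some]
    congr 1
    apply List.ext_getElem?
    intro c'
    by_cases hc' : c' < w
    · have := hcell r' c' hc' hr'
      rw [pvCell?, hrow, Option.bind_some] at this
      rw [this, List.getElem?_map, List.getElem?_range hc', Option.map_some]
    · rw [List.getElem?_eq_none (by omega), List.getElem?_eq_none (by simp; omega)]
  · rw [List.getElem?_eq_none (by rw [hshape.1]; omega), List.getElem?_eq_none (by simp; omega)]
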